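-- pv_equiv track=rewrite | github.com/Jetrom17/Domain_Variations | dv.py | gerar_variacoes
-- ===== SOURCE A (Python) =====
-- def gerar_variacoes(dominio_base):
--     variacoes = set()
--     substituicoes = {
--         'a': ['á', 'à', 'â', 'ä'],
--         'e': ['é', 'è', 'ê', 'ë'],
--         'u': ['ú', 'ù', 'û', 'ü'],
--         'n': ['ñ'],
--     }
--
--     def substituir_caracteres(dominio, pos):
--         if pos >= len(dominio):
--             return [dominio]
--
--         variacoes_pos = []
--         if dominio[pos] in substituicoes:
--             for substituicao in substituicoes[dominio[pos]]:
--                 nova_variacao = dominio[:pos] + substituicao + dominio[pos+1:]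
--                 variacoes_pos.extend(substituir_caracteres(nova_variacao, pos+1))
--         variacoes_pos.extend(substituir_caracteres(dominio, pos+1))
--
--         return variacoes_pos
--
--     variacoes.update(substituir_caracteres(dominio_base, 0))
--     return list(variacoes)
-- ===== SOURCE B (Python) =====
-- def gerar_variacoes(dominio_base):
--     substituicoes = {
--         'a': ['á', 'à', 'â', 'ä'],
--         'e': ['é', 'è', 'ê', 'ë'],
--         'u': ['ú', 'ù', 'û', 'ü'],
--         'n': ['ñ'],
--     }
--     combos = ['']
--     for c in dominio_base:
--         opcoes = substituicoes.get(c, []) + [c]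
--         combos = [pre + o for pre in combos for o in opcoes]
--     return list(set(combos))
-- ===== Notes on version B (the rewrite author's own statement) =====
-- stated objective: alternative
-- what changed: Replaces A's per-position recursion, which rebuilds the whole string by slicing at every substitution point, with a single iterative product: one pass over the characters extending a list of prefixes by each character's option list, then the same list(set(...)) dedup.
import Mathlib
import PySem

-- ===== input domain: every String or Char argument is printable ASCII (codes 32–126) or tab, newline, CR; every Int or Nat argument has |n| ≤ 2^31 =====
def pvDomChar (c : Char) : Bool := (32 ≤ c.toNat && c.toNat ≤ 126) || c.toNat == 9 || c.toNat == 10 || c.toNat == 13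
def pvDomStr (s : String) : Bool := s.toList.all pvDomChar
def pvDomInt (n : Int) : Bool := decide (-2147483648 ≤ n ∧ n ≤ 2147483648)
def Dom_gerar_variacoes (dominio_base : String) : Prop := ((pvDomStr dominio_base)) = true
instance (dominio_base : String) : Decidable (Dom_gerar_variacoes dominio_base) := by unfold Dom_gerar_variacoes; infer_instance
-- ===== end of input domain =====

-- B replaces A's per-position recursion (which rebuilds whole strings by slicing) with one
-- iterative product over per-character option lists (no re-slicing); same result list.

-- ===== PORT A =====
-- the substituicoes dict (shared by both ports, as in both Pythons)
def pvSubsts : PySem.Dict Char (List Char) :=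
  PySem.Dict.ofList
  [('a', ['á', 'à', 'â', 'ä']),
   ('e', ['é', 'è', 'ê', 'ë']),
   ('u', ['ú', 'ù', 'û', 'ü']),
   ('n', ['ñ'])]

-- substituir_caracteres; fuel = remaining positions (the Python recursion depth), purely for
-- termination.  'if c in d: for s in d[c]' over a list-valued dict = flatMap over getD _ [].
def pvSubstituir (fuel : Nat) (dominio : List Char) (pos : Nat) : List (List Char) :=
  match fuel with
  | 0 => [dominio]
  | f + 1 =>
    if dominio.length ≤ pos then [dominio]
    else
      ((PySem.Dict.getD pvSubsts (dominio.getD pos ' ') []).flatMap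
        (fun s => pvSubstituir f (dominio.take pos ++ [s] ++ dominio.drop (pos + 1)) (pos + 1)))
      ++ pvSubstituir f dominio (pos + 1)

def gerar_variacoes (dominio_base : String) : List String :=
  PySem.Set.ofList ((pvSubstituir dominio_base.toList.length dominio_base.toList 0).map String.ofList)

-- ===== PORT B =====
def gerar_variacoes_alt (dominio_base : String) : List String :=
  let combos := dominio_base.toList.foldl
    (fun combos c =>
      combos.flatMap (fun pre =>
        (PySem.Dict.getD pvSubsts c [] ++ [c]).map (fun o => pre ++ [o])))
    [([] : List Char)]
  PySem.Set.ofList (combos.map String.ofList)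

-- ===== PRECONDITION & SPEC =====
def Spec_gerar_variacoes (dominio_base : String) (out : List String) : Prop := out = gerar_variacoes_alt dominio_base
instance (dominio_base : String) (out : List String) : Decidable (Spec_gerar_variacoes dominio_base out) := by unfold Spec_gerar_variacoes; infer_instance

-- ===== CLAIM (what is proved, stated in full; the proofs are below) =====
def Claim_equal_gerar_variacoes : Prop := ∀ (dominio_base : String), Dom_gerar_variacoes dominio_base → Spec_gerar_variacoes dominio_base (gerar_variacoes dominio_base)

-- ===== LEMMAS AND PROOFS =====

-- the option list at a character: substitutions first, original last (the order A emits)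
def pvOpts (c : Char) : List Char := PySem.Dict.getD pvSubsts c [] ++ [c]

-- the product of the option lists of a suffix, position 0 varying slowest
def pvProd : List Char → List (List Char)
  | [] => [[]]
  | c :: cs => (pvOpts c).flatMap (fun o => (pvProd cs).map (o :: ·))

theorem pvGetD_append (pre : List Char) (c : Char) (cs : List Char) (d : Char) :
    (pre ++ c :: cs).getD pre.length d = c := by
  simp [List.getD]

theorem pvSubstituir_eq (suf : List Char) :
    ∀ (fuel : Nat) (pre : List Char), suf.length ≤ fuel →
      pvSubstituir fuel (pre ++ suf) pre.length = (pvProd suf).map (pre ++ ·) := by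
  induction suf with
  | nil =>
    intro fuel pre _
    cases fuel with
    | zero => simp [pvSubstituir, pvProd]
    | succ f => simp [pvSubstituir, pvProd]
  | cons c cs ih =>
    intro fuel pre hf
    cases fuel with
    | zero => simp at hf
    | succ f =>
      have hcs : cs.length ≤ f := by simpa using hf
      have hlen : ¬ (pre ++ c :: cs).length ≤ pre.length := by simp
      have htake : (pre ++ c :: cs).take pre.length = pre := by
        simp
      have hdrop : (pre ++ c :: cs).drop (pre.length + 1) = cs := by
        rw [show pre ++ c :: cs = (pre ++ [c]) ++ cs by simp,
            show pre.length + 1 = (pre ++ [c]).length by simp]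
        simp
      have hrec : ∀ s : Char,
          pvSubstituir f (pre ++ [s] ++ cs) (pre.length + 1)
            = (pvProd cs).map ((pre ++ [s]) ++ ·) := by
        intro s
        have := ih f (pre ++ [s]) hcs
        simpa [List.append_assoc] using this
      show (if (pre ++ c :: cs).length ≤ pre.length then [pre ++ c :: cs]
        else
          ((PySem.Dict.getD pvSubsts ((pre ++ c :: cs).getD pre.length ' ') []).flatMap
            (fun s => pvSubstituir f ((pre ++ c :: cs).take pre.length ++ [s]
                ++ (pre ++ c :: cs).drop (pre.length + 1)) (pre.length + 1)))
          ++ pvSubstituir f (pre ++ c :: cs) (pre.length + 1)) = _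
      rw [if_neg hlen, pvGetD_append, htake, hdrop]
      have horig : pvSubstituir f (pre ++ c :: cs) (pre.length + 1)
          = (pvProd cs).map ((pre ++ [c]) ++ ·) := by
        have := hrec c
        simpa using this
      rw [horig]
      have hflat : (PySem.Dict.getD pvSubsts c []).flatMap
            (fun s => pvSubstituir f (pre ++ [s] ++ cs) (pre.length + 1))
          = (PySem.Dict.getD pvSubsts c []).flatMap
            (fun s => (pvProd cs).map ((pre ++ [s]) ++ ·)) := by
        exact List.flatMap_congr (fun s _ => hrec s)
      rw [hflat]
      simp [pvProd, pvOpts, List.flatMap_append, List.map_flatMap, List.map_map,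
            Function.comp_def]

theorem pvFoldl_eq (l : List Char) :
    ∀ (acc : List (List Char)),
      l.foldl (fun combos c =>
          combos.flatMap (fun pre =>
            (PySem.Dict.getD pvSubsts c [] ++ [c]).map (fun o => pre ++ [o]))) acc
        = acc.flatMap (fun pre => (pvProd l).map (pre ++ ·)) := by
  induction l with
  | nil => intro acc; simp [pvProd]
  | cons c cs ih =>
    intro acc
    rw [List.foldl_cons, ih]
    simp [pvProd, pvOpts, List.flatMap_assoc, List.flatMap_map, List.map_flatMap,
          List.map_map, Function.comp_def, List.flatMap_append, List.append_assoc]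

-- ===== VERDICT (by name: the statement is the Claim_ definition above) =====
theorem gerar_variacoes_spec : Claim_equal_gerar_variacoes := by
  intro s _
  unfold Spec_gerar_variacoes gerar_variacoes gerar_variacoes_alt
  have hA := pvSubstituir_eq s.toList s.toList.length ([]) (le_refl _)
  simp only [List.nil_append, List.length_nil] at hA
  rw [hA, pvFoldl_eq]
  simp
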